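-- pv_equiv track=rewrite | github.com/Silocean/Codewars | 6ku_triple_trouble.py | triple_double
-- ===== SOURCE A (Python) =====
-- def triple_double(num1, num2):
--     #code me ^^
--     num1 = str(num1)
--     num2 = str(num2)
--     a = ''
--     flag = False
--     for i in range(len(num1) - 2):
--         if len(set(num1[i:i+3])) == 1:
--             a = num1[i]
--             flag = True
--             break
--     if flag:
--         for j in range(len(num2)-1):
--             if len(set(num2[j:j+2])) == 1 and num2[j] == a:
--                 return 1
--         return 0
--     else:
--         return 0
-- ===== SOURCE B (Python) =====
-- def triple_double(num1, num2):
--     s1, s2 = str(num1), str(num2)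
--     return int(any(c * 3 in s1 and c * 2 in s2 for c in s1))
-- ===== Notes on version B (the rewrite author's own statement) =====
-- stated objective: simpler
-- what changed: Replaces A's two staged index-window scans (find first triple with set(), then scan for a double of that char) by a single any() over the characters of str(num1) testing substring containment c*3 in str(num1) and c*2 in str(num2), which also implements the kata's intended ANY-triple semantics instead of A's first-triple-only semantics.
-- intended difference: On inputs where some tripled character of str(num1) has a consecutive double in str(num2) but the FIRST tripled character does not (e.g. (111222, 22)), A returns 0 while B returns 1; B's value is intended because the kata asks whether ANY digit appears tripled in num1 and doubled in num2. — e.g. on triple_double(111222, 22): A returns 0, B returns 1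
import Mathlib
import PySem

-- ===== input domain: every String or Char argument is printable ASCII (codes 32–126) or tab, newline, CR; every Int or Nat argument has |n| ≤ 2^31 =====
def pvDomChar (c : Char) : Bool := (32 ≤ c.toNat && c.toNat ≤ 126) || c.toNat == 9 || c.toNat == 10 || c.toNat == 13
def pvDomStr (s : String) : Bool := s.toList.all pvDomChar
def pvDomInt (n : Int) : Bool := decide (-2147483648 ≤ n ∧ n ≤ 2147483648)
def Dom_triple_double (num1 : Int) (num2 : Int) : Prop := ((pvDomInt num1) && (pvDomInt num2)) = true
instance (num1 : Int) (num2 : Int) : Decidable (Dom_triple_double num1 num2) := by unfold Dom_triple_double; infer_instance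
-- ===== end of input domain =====

-- B is one any() over substring-containment tests (c*3 in s1 and c*2 in s2), simpler than A's
-- two staged index-window scans, and implements the intended ANY-triple semantics (see D_ below).

-- ===== PORT A =====
-- first loop: 'for i in range(len(num1)-2): if len(set(num1[i:i+3]))==1: a=num1[i]; flag=True; break'
def tdLoop1 (s : List Char) : List Int → Option Char
  | [] => none
  | i :: rest =>
      if (PySem.Set.ofList (PySem.List.slice s (some i) (some (i + 3)))).length = 1 then
        PySem.List.pyGet? s i
      else tdLoop1 s rest

-- second loop: 'for j in range(len(num2)-1): if len(set(num2[j:j+2]))==1 and num2[j]==a: return 1' then 'return 0'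
def tdLoop2 (s : List Char) (a : Char) : List Int → Int
  | [] => 0
  | j :: rest =>
      if (PySem.Set.ofList (PySem.List.slice s (some j) (some (j + 2)))).length = 1
          ∧ PySem.List.pyGet? s j = some a then 1
      else tdLoop2 s a rest

def triple_double (num1 : Int) (num2 : Int) : Int :=
  match tdLoop1 (PySem.Int.toChars num1)
      (PySem.List.pyRange 0 (((PySem.Int.toChars num1).length : Int) - 2) 1) with
  | some a => tdLoop2 (PySem.Int.toChars num2) a
      (PySem.List.pyRange 0 (((PySem.Int.toChars num2).length : Int) - 1) 1)
  | none => 0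

-- ===== PORT B =====
-- 'int(any(c * 3 in s1 and c * 2 in s2 for c in s1))'
def triple_double_alt (num1 : Int) (num2 : Int) : Int :=
  if (PySem.Int.toChars num1).any (fun c =>
      PySem.Chars.isIn [c, c, c] (PySem.Int.toChars num1) &&
      PySem.Chars.isIn [c, c] (PySem.Int.toChars num2)) then 1 else 0

-- ===== PRECONDITION & SPEC =====
-- 'three equal consecutive chars starting at index i' (used only to state D_)
def pvTripleAt (s : List Char) (i : Nat) : Bool :=
  decide (i + 2 < s.length) && (s.getD i ' ' == s.getD (i + 1) ' ') && (s.getD (i + 1) ' ' == s.getD (i + 2) ' ')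

-- On inputs where some tripled character of str(num1) has a consecutive double in str(num2) but the
-- FIRST tripled character does not, A returns 0 while B returns 1; B's value is intended because the
-- kata asks whether ANY digit appears tripled in num1 and doubled in num2.
def D_triple_double (num1 : Int) (num2 : Int) : Prop :=
  (∃ c ∈ PySem.Int.toChars num1, PySem.Chars.isIn [c, c, c] (PySem.Int.toChars num1) = true ∧
    PySem.Chars.isIn [c, c] (PySem.Int.toChars num2) = true) ∧
  (∃ i < (PySem.Int.toChars num1).length, pvTripleAt (PySem.Int.toChars num1) i = true ∧
    (∀ j < i, pvTripleAt (PySem.Int.toChars num1) j = false) ∧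
    PySem.Chars.isIn [(PySem.Int.toChars num1).getD i ' ', (PySem.Int.toChars num1).getD i ' ']
      (PySem.Int.toChars num2) = false)
instance (num1 : Int) (num2 : Int) : Decidable (D_triple_double num1 num2) := by
  unfold D_triple_double; infer_instance

def Spec_triple_double (num1 : Int) (num2 : Int) (out : Int) : Prop :=
  ¬ D_triple_double num1 num2 → out = triple_double_alt num1 num2
instance (num1 : Int) (num2 : Int) (out : Int) : Decidable (Spec_triple_double num1 num2 out) := by
  unfold Spec_triple_double; infer_instance

def pvDiffWitness_triple_double : Int × Int := (111222, 22)
def pvDiffWitnessOut_triple_double : Int × Int := (0, 1)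

-- ===== CLAIM (what is proved, stated in full; the proofs are below) =====
def Claim_unchanged_triple_double : Prop := ∀ (num1 : Int) (num2 : Int), Dom_triple_double num1 num2 → Spec_triple_double num1 num2 (triple_double num1 num2)
def Claim_changed_triple_double : Prop := Dom_triple_double (pvDiffWitness_triple_double.1) (pvDiffWitness_triple_double.2) ∧ D_triple_double (pvDiffWitness_triple_double.1) (pvDiffWitness_triple_double.2) ∧ triple_double (pvDiffWitness_triple_double.1) (pvDiffWitness_triple_double.2) = pvDiffWitnessOut_triple_double.1 ∧ triple_double_alt (pvDiffWitness_triple_double.1) (pvDiffWitness_triple_double.2) = pvDiffWitnessOut_triple_double.2 ∧ pvDiffWitnessOut_triple_double.1 ≠ pvDiffWitnessOut_triple_double.2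
def Claim_exact_triple_double : Prop := ∀ (num1 : Int) (num2 : Int), Dom_triple_double num1 num2 → D_triple_double num1 num2 → triple_double num1 num2 ≠ triple_double_alt num1 num2

-- ===== LEMMAS AND PROOFS =====

-- proof-side scanners characterizing A's two loops
def altTriple : List Char → Option Char
  | x :: y :: z :: rest => if x = y ∧ y = z then some x else altTriple (y :: z :: rest)
  | _ => none

def altHasDouble (a : Char) : List Char → Bool
  | x :: y :: rest => if x = a ∧ a = y then true else altHasDouble a (y :: rest)
  | _ => false

theorem set3_len_one (x y z : Char) :
    (PySem.Set.ofList [x, y, z]).length = 1 ↔ (x = y ∧ y = z) := by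
  by_cases hxy : x = y <;> by_cases hyz : y = z <;> by_cases hxz : x = z <;>
    simp_all [PySem.Set.ofList, PySem.Set.add, PySem.Set.contains, eq_comm]

theorem set2_len_one (x y : Char) :
    (PySem.Set.ofList [x, y]).length = 1 ↔ x = y := by
  by_cases hxy : x = y <;> simp_all [PySem.Set.ofList, PySem.Set.add, PySem.Set.contains, eq_comm]

theorem loop1_eq (suf : List Char) : ∀ (pre : List Char),
    tdLoop1 (pre ++ suf) (PySem.List.pyRange pre.length ((pre.length : Int) + suf.length - 2) 1)
      = altTriple suf := by
  induction suf with
  | nil =>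
      intro pre
      rw [PySem.List.pyRange_one_eq_nil (by simp)]
      simp [tdLoop1, altTriple]
  | cons x suf' ih =>
      intro pre
      match suf' with
      | [] =>
          rw [PySem.List.pyRange_one_eq_nil (by simp)]
          simp [tdLoop1, altTriple]
      | [y] =>
          rw [PySem.List.pyRange_one_eq_nil (by simp)]
          simp [tdLoop1, altTriple]
      | y :: z :: rest =>
          rw [PySem.List.pyRange_one_cons (by simp; omega)]
          rw [tdLoop1]
          have hslice : PySem.List.slice (pre ++ x :: y :: z :: rest)
              (some (pre.length : Int)) (some ((pre.length : Int) + 3)) = [x, y, z] := by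
            have h3 : ((pre.length : Int) + 3) = ((pre.length + 3 : Nat) : Int) := by push_cast; ring
            rw [h3, PySem.List.slice_natCast, List.drop_left]
            simp
          rw [hslice, PySem.List.pyGet?_append_length]
          rw [show altTriple (x :: y :: z :: rest)
                = if x = y ∧ y = z then some x else altTriple (y :: z :: rest) from rfl]
          by_cases h : x = y ∧ y = z
          · rw [if_pos ((set3_len_one x y z).mpr h), if_pos h]
          · rw [if_neg (fun hc => h ((set3_len_one x y z).mp hc)), if_neg h]
            have := ih (pre ++ [x])
            simp only [List.append_assoc, List.cons_append, List.nil_append,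
              List.length_append, List.length_cons, List.length_nil] at this ⊢
            have harg : ((pre.length : Int) + 1) = ((pre.length + 1 : Nat) : Int) := by push_cast; ring
            rw [harg]
            convert this using 3
            push_cast; ring

theorem loop2_eq (a : Char) (suf : List Char) : ∀ (pre : List Char),
    tdLoop2 (pre ++ suf) a (PySem.List.pyRange pre.length ((pre.length : Int) + suf.length - 1) 1)
      = if altHasDouble a suf then 1 else 0 := by
  induction suf with
  | nil =>
      intro pre
      rw [PySem.List.pyRange_one_eq_nil (by simp)]
      simp [tdLoop2, altHasDouble]
  | cons x suf' ih =>
      intro pre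
      match suf' with
      | [] =>
          rw [PySem.List.pyRange_one_eq_nil (by simp)]
          simp [tdLoop2, altHasDouble]
      | y :: rest =>
          rw [PySem.List.pyRange_one_cons (by simp; omega)]
          rw [tdLoop2]
          have hslice : PySem.List.slice (pre ++ x :: y :: rest)
              (some (pre.length : Int)) (some ((pre.length : Int) + 2)) = [x, y] := by
            have h2 : ((pre.length : Int) + 2) = ((pre.length + 2 : Nat) : Int) := by push_cast; ring
            rw [h2, PySem.List.slice_natCast, List.drop_left]
            simp
          rw [hslice, PySem.List.pyGet?_append_length]
          rw [show altHasDouble a (x :: y :: rest)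
                = if x = a ∧ a = y then true else altHasDouble a (y :: rest) from rfl]
          by_cases h : x = a ∧ a = y
          · rw [if_pos ⟨(set2_len_one x y).mpr (h.1.trans h.2), by rw [h.1]⟩, if_pos h]
            simp
          · have hne : ¬ ((PySem.Set.ofList [x, y]).length = 1 ∧ PySem.List.pyGet? (pre ++ x :: y :: rest) (pre.length : Int) = some a) := by
              rw [PySem.List.pyGet?_append_length]
              rintro ⟨h1, h2⟩
              exact h ⟨by injection h2, by injection h2 with h2'; rw [← h2']; exact (set2_len_one x y).mp h1⟩
            rw [PySem.List.pyGet?_append_length] at hne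
            rw [if_neg hne, if_neg h]
            have := ih (pre ++ [x])
            simp only [List.append_assoc, List.cons_append, List.nil_append,
              List.length_append, List.length_cons, List.length_nil] at this ⊢
            have harg : ((pre.length : Int) + 1) = ((pre.length + 1 : Nat) : Int) := by push_cast; ring
            rw [harg]
            convert this using 3
            push_cast; ring

-- A computes: find first triple via altTriple, then test for a double of that char
theorem A_char (num1 num2 : Int) :
    triple_double num1 num2
      = match altTriple (PySem.Int.toChars num1) with
        | none => 0
        | some a => if altHasDouble a (PySem.Int.toChars num2) then 1 else 0 := by
  unfold triple_double
  have h1 := loop1_eq (PySem.Int.toChars num1) []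
  simp only [List.nil_append, List.length_nil, Nat.cast_zero, zero_add] at h1
  rw [h1]
  cases altTriple (PySem.Int.toChars num1) with
  | none => rfl
  | some a =>
      have h2 := loop2_eq a (PySem.Int.toChars num2) []
      simp only [List.nil_append, List.length_nil, Nat.cast_zero, zero_add] at h2
      exact h2

theorem A_char_none (num1 num2 : Int) (h : altTriple (PySem.Int.toChars num1) = none) :
    triple_double num1 num2 = 0 := by
  rw [A_char, h]

theorem A_char_some (num1 num2 : Int) (a : Char)
    (h : altTriple (PySem.Int.toChars num1) = some a) :
    triple_double num1 num2 = if altHasDouble a (PySem.Int.toChars num2) then 1 else 0 := by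
  rw [A_char, h]

-- altHasDouble is the substring test [a,a] in s
theorem hasDouble_iff (a : Char) : ∀ (s : List Char), altHasDouble a s = true ↔ [a, a] <:+: s := by
  intro s
  induction s with
  | nil => simp [altHasDouble]
  | cons x t ih =>
      match t, ih with
      | [], _ =>
          simp only [altHasDouble, Bool.false_eq_true, false_iff]
          intro hin
          have := hin.length_le
          simp at this
      | y :: r, ih =>
          rw [show altHasDouble a (x :: y :: r)
                = if x = a ∧ a = y then true else altHasDouble a (y :: r) from rfl]
          rw [List.infix_cons_iff]
          by_cases h : x = a ∧ a = y
          · obtain ⟨rfl, rfl⟩ := h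
            rw [if_pos ⟨rfl, rfl⟩]
            exact iff_of_true rfl (Or.inl ⟨r, rfl⟩)
          · rw [if_neg h, ih]
            constructor
            · intro hin; right; exact hin
            · rintro (hp | hin)
              · rcases hp with ⟨u, hu⟩
                simp only [List.cons_append, List.nil_append] at hu
                injection hu with h1 h2
                injection h2 with h3 h4
                exact absurd ⟨h1.symm, h3⟩ h
              · exact hin

-- shifting pvTripleAt under cons
theorem tripleAt_cons_succ (x : Char) (t : List Char) (i : Nat) :
    pvTripleAt (x :: t) (i + 1) = pvTripleAt t i := by
  simp only [pvTripleAt, List.getD, List.length_cons, List.getElem?_cons_succ]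
  congr 1
  congr 1
  exact decide_eq_decide.mpr (by omega)

theorem tripleAt_cons_zero (x y z : Char) (r : List Char) :
    pvTripleAt (x :: y :: z :: r) 0 = ((x == y) && (y == z)) := by
  simp [pvTripleAt, List.getD]

theorem tripleAt_short_nil (i : Nat) : pvTripleAt [] i = false := by
  simp [pvTripleAt]

theorem tripleAt_short_one (x : Char) (i : Nat) : pvTripleAt [x] i = false := by
  simp [pvTripleAt]

theorem tripleAt_short_two (x y : Char) (i : Nat) : pvTripleAt [x, y] i = false := by
  simp [pvTripleAt]

theorem getD_cons_succ (x : Char) (t : List Char) (i : Nat) :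
    (x :: t).getD (i + 1) ' ' = t.getD i ' ' := by
  simp [List.getD]

-- altTriple = none ↔ no triple anywhere
theorem altTriple_none_iff : ∀ (s : List Char),
    altTriple s = none ↔ ∀ i, pvTripleAt s i = false := by
  intro s
  induction s with
  | nil => simp [altTriple, tripleAt_short_nil]
  | cons x t ih =>
      match t, ih with
      | [], _ => simp [altTriple, tripleAt_short_one]
      | [y], _ => simp [altTriple, tripleAt_short_two]
      | y :: z :: r, ih =>
          rw [show altTriple (x :: y :: z :: r)
                = if x = y ∧ y = z then some x else altTriple (y :: z :: r) from rfl]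
          by_cases h : x = y ∧ y = z
          · rw [if_pos h]
            constructor
            · intro hc; cases hc
            · intro hall
              have := hall 0
              rw [tripleAt_cons_zero] at this
              simp [h.1, h.2] at this
          · rw [if_neg h, ih]
            constructor
            · intro hall i
              cases i with
              | zero =>
                  rw [tripleAt_cons_zero]
                  by_cases hxy : x = y
                  · by_cases hyz : y = z
                    · exact absurd ⟨hxy, hyz⟩ h
                    · simp [hyz]
                  · simp [hxy]
              | succ j => rw [tripleAt_cons_succ]; exact hall j
            · intro hall j
              have := hall (j + 1)
              rwa [tripleAt_cons_succ] at this

-- altTriple = some a ↔ a is the char of the FIRST triple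
theorem altTriple_some_iff (a : Char) : ∀ (s : List Char),
    altTriple s = some a ↔
      ∃ i, pvTripleAt s i = true ∧ (∀ j < i, pvTripleAt s j = false) ∧ s.getD i ' ' = a := by
  intro s
  induction s with
  | nil => simp [altTriple, tripleAt_short_nil]
  | cons x t ih =>
      match t, ih with
      | [], _ => simp [altTriple, tripleAt_short_one]
      | [y], _ => simp [altTriple, tripleAt_short_two]
      | y :: z :: r, ih =>
          rw [show altTriple (x :: y :: z :: r)
                = if x = y ∧ y = z then some x else altTriple (y :: z :: r) from rfl]
          by_cases h : x = y ∧ y = z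
          · rw [if_pos h]
            constructor
            · intro hs
              injection hs with hs
              refine ⟨0, ?_, by omega, by simp [List.getD, hs]⟩
              rw [tripleAt_cons_zero]; simp [h.1, h.2]
            · rintro ⟨i, hti, hmin, hget⟩
              cases i with
              | zero => simp [List.getD] at hget; rw [hget]
              | succ j =>
                  have := hmin 0 (by omega)
                  rw [tripleAt_cons_zero] at this
                  simp [h.1, h.2] at this
          · rw [if_neg h, ih]
            have hz : pvTripleAt (x :: y :: z :: r) 0 = false := by
              rw [tripleAt_cons_zero]
              by_cases hxy : x = y
              · by_cases hyz : y = z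
                · exact absurd ⟨hxy, hyz⟩ h
                · simp [hyz]
              · simp [hxy]
            constructor
            · rintro ⟨i, hti, hmin, hget⟩
              refine ⟨i + 1, ?_, ?_, ?_⟩
              · rwa [tripleAt_cons_succ]
              · intro j hj
                cases j with
                | zero => exact hz
                | succ k => rw [tripleAt_cons_succ]; exact hmin k (by omega)
              · rwa [getD_cons_succ]
            · rintro ⟨i, hti, hmin, hget⟩
              cases i with
              | zero => rw [hz] at hti; cases hti
              | succ j =>
                  rw [tripleAt_cons_succ] at hti
                  refine ⟨j, hti, ?_, ?_⟩
                  · intro k hk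
                    have := hmin (k + 1) (by omega)
                    rwa [tripleAt_cons_succ] at this
                  · rwa [getD_cons_succ] at hget

-- [c,c,c] is an infix of s ↔ a triple of c starts at some index
theorem infix3_iff (c : Char) : ∀ (s : List Char),
    [c, c, c] <:+: s ↔ ∃ i, pvTripleAt s i = true ∧ s.getD i ' ' = c := by
  intro s
  induction s with
  | nil =>
      constructor
      · intro hin
        exact absurd hin.length_le (by simp)
      · rintro ⟨i, hti, _⟩
        rw [tripleAt_short_nil] at hti
        cases hti
  | cons x t ih =>
      rw [List.infix_cons_iff, ih]
      constructor
      · rintro (hp | ⟨i, hti, hget⟩)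
        · rcases hp with ⟨u, hu⟩
          match t, hu with
          | _, rfl =>
              refine ⟨0, ?_, by simp [List.getD]⟩
              simp [pvTripleAt, List.getD]
        · refine ⟨i + 1, ?_, ?_⟩
          · rwa [tripleAt_cons_succ]
          · rwa [getD_cons_succ]
      · rintro ⟨i, hti, hget⟩
        cases i with
        | zero =>
            left
            simp only [pvTripleAt, Bool.and_eq_true, beq_iff_eq, decide_eq_true_eq] at hti
            obtain ⟨⟨hlen, h01⟩, h12⟩ := hti
            simp only [List.getD] at hget h01 h12
            match t, hlen with
            | y :: z :: r, _ =>
                simp at hget h01 h12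
                refine ⟨r, ?_⟩
                rw [← hget, h01, ← h12, ← h01]
                simp
        | succ j =>
            right
            rw [tripleAt_cons_succ] at hti
            rw [getD_cons_succ] at hget
            exact ⟨j, hti, hget⟩

-- a tripled char occurs in s
theorem mem_of_infix3 (c : Char) (s : List Char) (h : [c, c, c] <:+: s) : c ∈ s :=
  h.subset (by simp)

-- B returns 1 iff some char of s1 is tripled in s1 and doubled in s2
theorem B_char (num1 num2 : Int) :
    triple_double_alt num1 num2
      = if (∃ c ∈ PySem.Int.toChars num1,
            [c, c, c] <:+: PySem.Int.toChars num1 ∧ [c, c] <:+: PySem.Int.toChars num2)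
        then 1 else 0 := by
  have hb : ((PySem.Int.toChars num1).any fun c =>
        PySem.Chars.isIn [c, c, c] (PySem.Int.toChars num1) &&
        PySem.Chars.isIn [c, c] (PySem.Int.toChars num2)) = true
      ↔ ∃ c ∈ PySem.Int.toChars num1,
          [c, c, c] <:+: PySem.Int.toChars num1 ∧ [c, c] <:+: PySem.Int.toChars num2 := by
    simp [List.any_eq_true, PySem.Chars.isIn_iff_infix]
  unfold triple_double_alt
  by_cases h : ∃ c ∈ PySem.Int.toChars num1,
      [c, c, c] <:+: PySem.Int.toChars num1 ∧ [c, c] <:+: PySem.Int.toChars num2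
  · rw [if_pos (hb.mpr h), if_pos h]
  · rw [if_neg (fun hbt => h (hb.mp hbt)), if_neg h]

-- ===== VERDICT (by name: the statement is the Claim_ definition above) =====
theorem triple_double_spec : Claim_unchanged_triple_double := by
  intro num1 num2 _ hnd
  cases htrip : altTriple (PySem.Int.toChars num1) with
  | none =>
      rw [A_char_none num1 num2 htrip, B_char]
      rw [if_neg]
      rintro ⟨c, _, h3, _⟩
      rcases (infix3_iff c _).mp h3 with ⟨i, hti, _⟩
      have := (altTriple_none_iff _).mp htrip i
      rw [this] at hti; cases hti
  | some a =>
      rw [A_char_some num1 num2 a htrip, B_char]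
      rcases (altTriple_some_iff a _).mp htrip with ⟨i, hti, hmin, hget⟩
      cases hdbl : altHasDouble a (PySem.Int.toChars num2) with
      | true =>
          rw [if_pos rfl, if_pos]
          have h3 : [a, a, a] <:+: PySem.Int.toChars num1 := (infix3_iff a _).mpr ⟨i, hti, hget⟩
          exact ⟨a, mem_of_infix3 a _ h3, h3, (hasDouble_iff a _).mp hdbl⟩
      | false =>
          rw [if_neg (by simp), if_neg]
          rintro ⟨c, hc, h3, h2⟩
          apply hnd
          unfold D_triple_double
          refine ⟨⟨c, hc, (PySem.Chars.isIn_iff_infix _ _).mpr h3, (PySem.Chars.isIn_iff_infix _ _).mpr h2⟩,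
            i, ?_, hti, hmin, ?_⟩
          · simp only [pvTripleAt, Bool.and_eq_true, decide_eq_true_eq] at hti
            omega
          · rw [hget]
            rw [PySem.Chars.isIn_eq_false_iff]
            intro hinf
            rw [(hasDouble_iff a _).mpr hinf] at hdbl
            cases hdbl

theorem triple_double_changed : Claim_changed_triple_double := by
  unfold Claim_changed_triple_double
  have h1 : PySem.Int.toChars 111222 = ['1', '1', '1', '2', '2', '2'] := by decide
  have h2 : PySem.Int.toChars 22 = ['2', '2'] := by decide
  refine ⟨by decide, ?_, ?_, ?_, by decide⟩
  · show D_triple_double 111222 22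
    unfold D_triple_double
    rw [h1, h2]
    constructor
    · exact ⟨'2', by decide, by decide, by decide⟩
    · exact ⟨0, by decide, by decide, fun j hj => absurd hj (by omega), by decide⟩
  · show triple_double 111222 22 = 0
    unfold triple_double
    rw [h1, h2]
    decide
  · show triple_double_alt 111222 22 = 1
    unfold triple_double_alt
    rw [h1, h2]
    decide

theorem triple_double_tight : Claim_exact_triple_double := by
  intro num1 num2 _ hd
  rcases hd with ⟨⟨c, hc, h3, h2⟩, i, hilen, hti, hmin, hnod⟩
  have hsome : altTriple (PySem.Int.toChars num1) = some ((PySem.Int.toChars num1).getD i ' ') :=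
    (altTriple_some_iff _ _).mpr ⟨i, hti, hmin, rfl⟩
  rw [A_char_some num1 num2 _ hsome, B_char]
  have hdbl : altHasDouble ((PySem.Int.toChars num1).getD i ' ') (PySem.Int.toChars num2) = false := by
    cases hb : altHasDouble ((PySem.Int.toChars num1).getD i ' ') (PySem.Int.toChars num2) with
    | false => rfl
    | true =>
        have := (hasDouble_iff _ _).mp hb
        rw [(PySem.Chars.isIn_iff_infix _ _).mpr this] at hnod
        cases hnod
  rw [hdbl]
  rw [if_neg (by simp),
    if_pos ⟨c, hc, (PySem.Chars.isIn_iff_infix _ _).mp h3, (PySem.Chars.isIn_iff_infix _ _).mp h2⟩]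
  simp
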